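-- pv_equiv track=rewrite | github.com/sorsater/advent_of_code | 2016/11.py | is_move_valid
-- ===== SOURCE A (Python) =====
-- def is_move_valid(floor, elems, add_together=True):
-- 	if add_together:
-- 		config = floor + elems
-- 	else:
-- 		config = list(set(floor) - set(elems))
--
-- 	for item in config:
-- 		if item[-1] == 'G':
-- 			break
-- 	else:
-- 		return True
--
-- 	# Need to check M:s
-- 	for item in config:
-- 		if item[-1] == 'G':
-- 			continue
-- 		if not item[:-1] + 'G' in config:
-- 			return False
-- 	else:
-- 		return True
-- ===== SOURCE B (Python) =====
-- def is_move_valid(floor, elems, add_together=True):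
-- 	if add_together:
-- 		config = floor + elems
-- 	else:
-- 		config = list(set(floor) - set(elems))
--
-- 	# Sort-then-scan: sort (prefix, is_chip) pairs so each generator comes
-- 	# immediately before the chips of the same element, then make one linear
-- 	# scan with a last-seen-generator accumulator.
-- 	pairs = sorted((item[:-1], item[-1] != 'G') for item in config)
-- 	any_gen = False
-- 	last_gen = None
-- 	all_matched = True
-- 	for prefix, is_chip in pairs:
-- 		if not is_chip:
-- 			any_gen = True
-- 			last_gen = prefix
-- 		elif prefix != last_gen:
-- 			all_matched = False
-- 	return (not any_gen) or all_matched
-- ===== Notes on version B (the rewrite author's own statement) =====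
-- stated objective: alternative
-- what changed: Replaces A's break/else generator scan plus a per-chip inner membership rescan of config with sorting the (prefix, is_chip) pairs once and a single linear scan carrying a last-seen-generator accumulator.
-- outside the precondition, e.g. on is_move_valid(['AM', 'CG', ''], ['AM'], True): A returns False, B raises IndexError
import Mathlib
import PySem

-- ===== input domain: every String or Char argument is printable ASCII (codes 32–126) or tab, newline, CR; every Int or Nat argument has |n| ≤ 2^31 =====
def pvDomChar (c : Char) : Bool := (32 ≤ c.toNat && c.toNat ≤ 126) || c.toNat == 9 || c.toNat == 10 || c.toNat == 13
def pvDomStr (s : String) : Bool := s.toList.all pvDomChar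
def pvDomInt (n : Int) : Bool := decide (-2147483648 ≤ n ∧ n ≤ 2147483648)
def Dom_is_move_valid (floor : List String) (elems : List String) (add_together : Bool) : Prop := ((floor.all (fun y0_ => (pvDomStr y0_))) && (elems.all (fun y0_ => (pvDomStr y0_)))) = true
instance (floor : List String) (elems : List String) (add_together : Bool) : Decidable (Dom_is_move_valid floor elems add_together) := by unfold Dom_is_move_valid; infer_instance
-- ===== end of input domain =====

-- B replaces A's break/else scan plus per-chip membership rescans of config by sorting the
-- (prefix, is_chip) pairs once and making one linear scan with a last-seen-generator
-- accumulator (objective: alternative — sort-then-scan instead of nested scans).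

-- ===== PORT A =====
-- shared by both ports: the identical Python line computing `config`
-- (list(set(floor) - set(elems)): downstream only membership in config matters for A, and B
-- sorts what it derives from config, so the hash iteration order of the set difference
-- cannot affect either result)
def pvConfig (floor : List String) (elems : List String) (add_together : Bool) : List (List Char) :=
  (if add_together then floor ++ elems
   else PySem.Set.diff (PySem.Set.ofList floor) elems).map String.toList

-- item[-1] == 'G'
def pvEndsG (item : List Char) : Bool := PySem.List.pyGet? item (-1) == some 'G'

def is_move_valid (floor : List String) (elems : List String) (add_together : Bool) : Bool :=
  let config := pvConfig floor elems add_together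
  -- first loop: break on a generator, else return True
  if config.any (fun item => pvEndsG item) then
    -- second loop over config: check the M:s
    config.all (fun item =>
      if pvEndsG item then true
      else config.contains (PySem.List.slice item none (some (-1)) ++ ['G']))
  else true

-- ===== PORT B =====
-- one loop step of B's scan over the sorted (prefix, is_chip) pairs;
-- state = (any_gen, last_gen, all_matched)
def pvStep (s : Bool × Option (List Char) × Bool) (pr : List Char × Bool) :
    Bool × Option (List Char) × Bool :=
  if !pr.2 then (true, some pr.1, s.2.2)
  else if some pr.1 ≠ s.2.1 then (s.1, s.2.1, false)
  else s

def is_move_valid_alt (floor : List String) (elems : List String) (add_together : Bool) : Bool :=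
  let config := pvConfig floor elems add_together
  -- pairs = sorted((item[:-1], item[-1] != 'G') for item in config)  (Python tuple order)
  let pairs := PySem.List.sorted2
    (config.map (fun item =>
      (PySem.List.slice item none (some (-1)),
       decide (¬ PySem.List.pyGet? item (-1) = some 'G'))))
    Prod.fst Prod.snd
  let s := pairs.foldl pvStep (false, none, true)
  !s.1 || s.2.2

-- ===== PRECONDITION & SPEC =====
-- Pre_ excludes exactly the inputs whose config contains the empty string: Python's item[-1]
-- raises IndexError on it; A may still return False by an earlier chip failing, but B raises there too.
def Pre_is_move_valid (floor : List String) (elems : List String) (add_together : Bool) : Prop :=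
  if add_together then ("" ∉ floor ∧ "" ∉ elems) else ("" ∈ floor → "" ∈ elems)
instance (floor : List String) (elems : List String) (add_together : Bool) : Decidable (Pre_is_move_valid floor elems add_together) := by unfold Pre_is_move_valid; infer_instance
def pvWitness_is_move_valid : List String × List String × Bool := (["AG", "AM"], ["BM"], true)

def Spec_is_move_valid (floor : List String) (elems : List String) (add_together : Bool) (out : Bool) : Prop := out = is_move_valid_alt floor elems add_together
instance (floor : List String) (elems : List String) (add_together : Bool) (out : Bool) : Decidable (Spec_is_move_valid floor elems add_together out) := by unfold Spec_is_move_valid; infer_instance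

-- ===== CLAIM (what is proved, stated in full; the proofs are below) =====
def Claim_equal_is_move_valid : Prop := ∀ (floor : List String) (elems : List String) (add_together : Bool), Dom_is_move_valid floor elems add_together → Pre_is_move_valid floor elems add_together → Spec_is_move_valid floor elems add_together (is_move_valid floor elems add_together)

-- ===== LEMMAS AND PROOFS =====

-- Python's sorted on (str, bool) tuples is the usual sort under the lexicographic order
theorem pv_sorted2_eq_sorted (xs : List (List Char × Bool)) :
    PySem.List.sorted2 xs Prod.fst Prod.snd
      = PySem.List.sorted xs (fun pr => (toLex pr : Lex (List Char × Bool))) := by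
  rw [PySem.List.sorted_eq_foldl_insertBy]
  show List.foldl (fun acc x => PySem.List.insertBy _ x acc) [] xs = _
  congr 1
  funext acc x
  congr 1
  funext a b
  rcases lt_trichotomy a.1 b.1 with h | h | h
  · simp [Prod.Lex.lt_iff, h]
  · simp [Prod.Lex.lt_iff, h]
  · simp [Prod.Lex.lt_iff, h, not_lt.2 (le_of_lt h)]
    intro heq
    exact absurd (heq ▸ h) (lt_irrefl _)

theorem pvEndsG_concat (ys : List Char) (c : Char) :
    pvEndsG (ys ++ [c]) = (c == 'G') := by
  simp [pvEndsG, PySem.List.pyGet?, PySem.List.pyIdx?]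

-- config member ends with 'G' at position -1 iff it is its dropLast followed by 'G'
theorem mem_concatG_iff (config : List (List Char)) (h : ∀ it ∈ config, it ≠ []) (x : List Char) :
    (x ++ ['G']) ∈ config ↔ ∃ g ∈ config, pvEndsG g = true ∧ g.dropLast = x := by
  constructor
  · intro hm
    exact ⟨x ++ ['G'], hm, by simp [pvEndsG_concat], by simp⟩
  · rintro ⟨g, hg, hG, rfl⟩
    obtain hnil | ⟨ys, c, rfl⟩ := List.eq_nil_or_concat g
    · exact absurd hnil (h g hg)
    simp [pvEndsG_concat] at hG
    simpa [hG] using hg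

-- the scan over a lex-sorted pair list, characterised in closed form
theorem pv_scan (l : List (List Char × Bool))
    (hs : l.Pairwise (fun a b => (toLex a : Lex (List Char × Bool)) ≤ toLex b))
    (ag am : Bool) (lg : Option (List Char))
    (hlg : ∀ g, lg = some g → ∀ pr ∈ l,
      (toLex ((g, false) : List Char × Bool) : Lex (List Char × Bool)) ≤ toLex pr) :
    (!(l.foldl pvStep (ag, lg, am)).1 || (l.foldl pvStep (ag, lg, am)).2.2)
    = (!(ag || l.any (fun pr => !pr.2))
       || (am && l.all (fun pr => !pr.2 || (lg == some pr.1 || decide ((pr.1, false) ∈ l))))) := by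
  induction l generalizing ag am lg with
  | nil => simp
  | cons pr t ih =>
    obtain ⟨p, b⟩ := pr
    obtain ⟨hhd, htl⟩ := List.pairwise_cons.1 hs
    cases b with
    | false =>
      -- generator: any_gen := True; last_gen := p
      have step : pvStep (ag, lg, am) (p, false) = (true, some p, am) := by
        simp [pvStep]
      rw [List.foldl_cons, step,
        ih htl true am (some p) (by
          rintro g hg pr' hpr'
          obtain rfl : p = g := by injection hg
          have h1 := hhd pr' hpr'
          exact le_trans (by simp [Prod.Lex.le_iff]) h1)]
      simp only [List.any_cons, List.all_cons, Bool.not_false, Bool.true_or, Bool.or_true,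
        Bool.not_true, Bool.false_or, Bool.true_and]
      have hall : t.all (fun q => !q.2 || (some p == some q.1 || decide ((q.1, false) ∈ t)))
          = t.all (fun q => !q.2 || (lg == some q.1 || decide ((q.1, false) ∈ (p, false) :: t))) := by
        rw [Bool.eq_iff_iff, List.all_eq_true, List.all_eq_true]
        constructor
        · intro hA q hq
          have := hA q hq
          rcases Bool.or_eq_true_iff.1 this with hc | hc
          · simp [hc]
          rcases Bool.or_eq_true_iff.1 hc with hc | hc
          · have : p = q.1 := Option.some.inj (eq_of_beq hc)
            simp [this, List.mem_cons]
          · simp [List.mem_cons, of_decide_eq_true hc]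
        · intro hB q hq
          have := hB q hq
          rcases Bool.or_eq_true_iff.1 this with hc | hc
          · simp [hc]
          rcases Bool.or_eq_true_iff.1 hc with hc | hc
          · -- lg = some q.1; if q is a chip then q.1 = p by the order
            by_cases hb : q.2 = true
            · have hglg : lg = some q.1 := eq_of_beq hc
              have h1 := hlg q.1 hglg ((p, false)) (List.mem_cons_self ..)
              have h2 := hhd q hq
              have hq1p : q.1 ≤ p := by
                rcases Prod.Lex.le_iff.1 h1 with h | h
                · exact le_of_lt h
                · exact le_of_eq h.1
              have hpq1 : p ≤ q.1 := by
                rcases Prod.Lex.le_iff.1 h2 with h | h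
                · exact le_of_lt h
                · exact le_of_eq h.1
              have : p = q.1 := le_antisymm hpq1 hq1p
              simp [this]
            · simp [Bool.not_eq_true] at hb
              simp [hb]
          · have hm : (q.1, false) ∈ (p, false) :: t := of_decide_eq_true hc
            rcases List.mem_cons.1 hm with hm | hm
            · have : q.1 = p := (Prod.mk.injEq .. ▸ hm).1
              simp [this]
            · simp [hm]
      rw [hall]
    | true =>
      -- chip: no gen bit; matched iff last_gen == p
      by_cases hlgp : lg = some p
      · have step : pvStep (ag, lg, am) (p, true) = (ag, lg, am) := by
          simp [pvStep, hlgp]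
        rw [List.foldl_cons, step,
          ih htl ag am lg (by
            intro g hg pr' hpr'
            exact hlg g hg pr' (List.mem_cons_of_mem _ hpr'))]
        simp only [List.any_cons, List.all_cons, Bool.not_true, Bool.false_or, Bool.false_and]
        have hhdP : (lg == some p) = true := beq_iff_eq.mpr hlgp
        rw [hhdP]
        simp only [Bool.true_or, Bool.or_true, Bool.true_and]
        have hall : t.all (fun q => !q.2 || (lg == some q.1 || decide ((q.1, false) ∈ t)))
            = t.all (fun q => !q.2 || (lg == some q.1 || decide ((q.1, false) ∈ (p, true) :: t))) := by
          rw [Bool.eq_iff_iff, List.all_eq_true, List.all_eq_true]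
          constructor
          · intro hA q hq
            rcases Bool.or_eq_true_iff.1 (hA q hq) with hc | hc
            · simp [hc]
            rcases Bool.or_eq_true_iff.1 hc with hc | hc
            · simp [hc]
            · simp [List.mem_cons, of_decide_eq_true hc]
          · intro hB q hq
            rcases Bool.or_eq_true_iff.1 (hB q hq) with hc | hc
            · simp [hc]
            rcases Bool.or_eq_true_iff.1 hc with hc | hc
            · simp [hc]
            · have hm : (q.1, false) ∈ (p, true) :: t := of_decide_eq_true hc
              rcases List.mem_cons.1 hm with hm | hm
              · exact absurd (Prod.mk.injEq .. ▸ hm).2 (by simp)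
              · simp [hm]
        rw [hall]
      · have step : pvStep (ag, lg, am) (p, true) = (ag, lg, false) := by
          simp [pvStep]
          exact fun h => absurd h.symm hlgp
        rw [List.foldl_cons, step,
          ih htl ag false lg (by
            intro g hg pr' hpr'
            exact hlg g hg pr' (List.mem_cons_of_mem _ hpr'))]
        simp only [List.any_cons, List.all_cons, Bool.not_true, Bool.false_or, Bool.false_and,
          Bool.and_false, Bool.or_false]
        -- the head chip is unmatched: lg ≠ some p and (p, false) cannot occur in the sorted tail
        have hnm : ((p, false) : List Char × Bool) ∉ t := by
          intro hm
          have := hhd _ hm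
          rcases Prod.Lex.le_iff.1 this with h | h
          · exact absurd h (lt_irrefl p)
          · exact absurd h.2 (by simp)
        have hheadP : (lg == some p || decide ((p, false) ∈ (p, true) :: t)) = false := by
          have h1 : (lg == some p) = false := beq_eq_false_iff_ne.mpr hlgp
          have h2 : ((p, false) : List Char × Bool) ∉ (p, true) :: t := by
            intro hm
            rcases List.mem_cons.1 hm with hm | hm
            · exact absurd (Prod.mk.injEq .. ▸ hm).2 (by simp)
            · exact hnm hm
          simp [h1, h2]
        rw [hheadP]
        simp
  
theorem pv_config_ne_nil (floor : List String) (elems : List String) (add_together : Bool)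
    (hp : Pre_is_move_valid floor elems add_together) :
    ∀ it ∈ pvConfig floor elems add_together, it ≠ [] := by
  intro it hit
  simp only [pvConfig, List.mem_map] at hit
  obtain ⟨s, hs, rfl⟩ := hit
  intro hnil
  have hse : s = "" := String.toList_eq_nil_iff.mp hnil
  subst hse
  unfold Pre_is_move_valid at hp
  cases add_together with
  | true =>
    simp only [if_pos] at hp
    simp only [if_pos, List.mem_append] at hs
    rcases hs with hs | hs
    · exact hp.1 hs
    · exact hp.2 hs
  | false =>
    simp only [Bool.false_eq_true, if_false] at hp hs
    have hmem : "" ∈ PySem.Set.diff (PySem.Set.ofList floor) elems := by simpa using hs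
    rw [PySem.Set.mem_diff] at hmem
    exact hmem.2 (hp (by rw [← PySem.Set.mem_ofList]; exact hmem.1))

-- the heart: A's two scans of config = B's sort + one scan, for any config without []
theorem pv_main (config : List (List Char)) (h : ∀ it ∈ config, it ≠ []) :
    (if config.any (fun item => pvEndsG item) then
       config.all (fun item =>
         if pvEndsG item then true
         else config.contains (item.dropLast ++ ['G']))
     else true)
    = (let pairs := PySem.List.sorted2
         (config.map (fun item => (item.dropLast, !pvEndsG item))) Prod.fst Prod.snd
       let s := pairs.foldl pvStep (false, none, true)
       !s.1 || s.2.2) := by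
  simp only [pv_sorted2_eq_sorted]
  set m := config.map (fun item => (item.dropLast, !pvEndsG item)) with hm
  set pairs := PySem.List.sorted m (fun pr => (toLex pr : Lex (List Char × Bool))) with hpairs
  have hperm : pairs.Perm m := PySem.List.sorted_perm m _ false
  have hscan := pv_scan pairs (PySem.List.sorted_pairwise m _) false true none (by simp)
  simp only [Bool.false_or, Bool.true_and] at hscan
  rw [hscan]
  have hany : pairs.any (fun pr => !pr.2) = config.any (fun item => pvEndsG item) := by
    rw [hperm.any_eq, hm, List.any_map]
    exact PySem.List.any_congr_mem (fun x hx => by simp [Function.comp, Bool.not_not])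
  have hnone : ∀ q : List Char × Bool, ((none : Option (List Char)) == some q.1) = false := by
    intro q; rfl
  have hall : pairs.all (fun pr => !pr.2 || ((none : Option (List Char)) == some pr.1 || decide ((pr.1, false) ∈ pairs)))
      = config.all (fun item =>
          if pvEndsG item then true
          else config.contains (item.dropLast ++ ['G'])) := by
    have hmemP : ∀ x : List Char, ((x, false) ∈ pairs ↔ (x ++ ['G']) ∈ config) := by
      intro x
      rw [hperm.mem_iff, hm, List.mem_map, mem_concatG_iff config h x]
      constructor
      · rintro ⟨it, hit, heq⟩
        obtain ⟨h1, h2⟩ := Prod.mk.injEq .. ▸ heq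
        exact ⟨it, hit, by simpa using h2, h1⟩
      · rintro ⟨g, hg, hG, hdl⟩
        exact ⟨g, hg, by simp [hG, hdl]⟩
    have hcong : pairs.all (fun pr => !pr.2 || ((none : Option (List Char)) == some pr.1 || decide ((pr.1, false) ∈ pairs)))
        = m.all (fun pr => !pr.2 || decide ((pr.1 ++ ['G']) ∈ config)) := by
      rw [hperm.all_eq]
      rw [Bool.eq_iff_iff, List.all_eq_true, List.all_eq_true]
      constructor
      · intro hA q hq
        rcases Bool.or_eq_true_iff.1 (hA q hq) with hc | hc
        · simp [hc]
        rcases Bool.or_eq_true_iff.1 hc with hc | hc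
        · rw [hnone q] at hc; exact absurd hc (by simp)
        · have := (hmemP q.1).1 (of_decide_eq_true hc)
          simp [this]
      · intro hB q hq
        rcases Bool.or_eq_true_iff.1 (hB q hq) with hc | hc
        · simp [hc]
        · have := (hmemP q.1).2 (of_decide_eq_true hc)
          simp [this]
    rw [hcong, hm, List.all_map]
    rw [Bool.eq_iff_iff, List.all_eq_true, List.all_eq_true]
    constructor
    · intro hA it hit
      have hthis := hA it hit
      by_cases hG : pvEndsG it = true
      · simp [hG]
      · simp only [Bool.not_eq_true] at hG
        simp only [Function.comp_def, hG, Bool.not_true, Bool.not_false, Bool.false_or] at hthis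
        have hmem : (it.dropLast ++ ['G']) ∈ config := of_decide_eq_true hthis
        rw [if_neg (by simp [hG])]
        simpa using hmem
    · intro hB it hit
      have hthis := hB it hit
      by_cases hG : pvEndsG it = true
      · simp [Function.comp_def, hG]
      · simp only [Bool.not_eq_true] at hG
        rw [if_neg (by simp [hG])] at hthis
        have hmem : (it.dropLast ++ ['G']) ∈ config := by simpa using hthis
        simp [Function.comp_def, hG, hmem]
  rw [hany, hall]
  cases hA : config.any (fun item => pvEndsG item) with
  | true => simp [hA]
  | false => simp [hA]

-- ===== VERDICT (by name: the statement is the Claim_ definition above) =====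
theorem is_move_valid_spec : Claim_equal_is_move_valid := by
  intro floor elems add_together _ hp
  unfold Spec_is_move_valid is_move_valid is_move_valid_alt
  simp only [PySem.List.slice_to_neg_one]
  have hpe : ∀ it : List Char,
      decide (¬ PySem.List.pyGet? it (-1) = some 'G') = !pvEndsG it := by
    intro it
    cases h : (PySem.List.pyGet? it (-1) == some 'G') with
    | true => simp [pvEndsG, h, eq_of_beq h]
    | false => simp [pvEndsG, h, ne_of_beq_false h]
  simp only [hpe]
  exact pv_main _ (pv_config_ne_nil floor elems add_together hp)
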